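-- pv_equiv track=rewrite | github.com/Mermiges/finorg | finorg/routing.py | normalize_folder_parts
-- ===== SOURCE A (Python) =====
-- from typing import Iterable
--
-- def normalize_folder_parts(parts: Iterable[str] | None) -> list[str]:
--     if not parts:
--         return []
--     normalized: list[str] = []
--     for part in parts:
--         if part is None:
--             continue
--         text = str(part).replace("\\", "/").strip().strip("/")
--         if not text:
--             continue
--         for token in text.split("/"):
--             item = token.strip()
--             if item:
--                 normalized.append(item)
--     return normalized
-- ===== SOURCE B (Python) =====
-- def normalize_folder_parts(parts):
--     if not parts:
--         return []
--     joined = "/".join(str(part).replace("\\", "/") for part in parts if part is not None)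
--     return [tok for tok in (t.strip() for t in joined.split("/")) if tok]
-- ===== Notes on version B (the rewrite author's own statement) =====
-- stated objective: alternative
-- what changed: A's nested loop (outer over parts, inner over each part's own strip/strip('/')/split('/')) is replaced by a single join of all backslash-normalized parts with '/', one split of that joined string, and one map-strip/filter-nonempty pass; A's outer strip and strip('/') are redundant because every token is stripped and empties are dropped.
import Mathlib
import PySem

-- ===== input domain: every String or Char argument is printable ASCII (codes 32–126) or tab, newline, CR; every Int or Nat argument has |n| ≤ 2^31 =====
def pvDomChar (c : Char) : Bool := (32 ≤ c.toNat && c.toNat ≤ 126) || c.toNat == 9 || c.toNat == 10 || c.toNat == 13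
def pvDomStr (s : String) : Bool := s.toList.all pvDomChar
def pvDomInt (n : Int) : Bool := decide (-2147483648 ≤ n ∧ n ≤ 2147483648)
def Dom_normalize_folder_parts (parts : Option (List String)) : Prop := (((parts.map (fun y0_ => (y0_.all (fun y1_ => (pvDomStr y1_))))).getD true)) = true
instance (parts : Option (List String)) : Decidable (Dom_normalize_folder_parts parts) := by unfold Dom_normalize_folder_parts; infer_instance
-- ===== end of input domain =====

-- B replaces A's nested loop (per-part split, inner token loop with an accumulator) by one join of the
-- backslash-normalized parts, one split of the joined string, and one map/filter pass (objective: alternative).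

-- ===== PORT A =====
-- Python A: per part, replace '\'->'/', strip, strip('/'), skip empty text, then split on '/' and
-- append each non-empty stripped token.  'part is None' never fires for typed List String; str(part) = part.
def normalize_folder_parts (parts : Option (List String)) : List String :=
  match parts with
  | none => []
  | some ps =>
      if ps.isEmpty then []
      else
        ps.foldl (fun normalized part =>
          let text := PySem.Str.stripChars (PySem.Str.strip (PySem.Str.replace part "\\" "/")) "/"
          if text = "" then normalized
          else
            -- text.split("/")  (sep nonempty, never raises): single-char split via PySem.Chars.splitOn
            ((PySem.Chars.splitOn text.toList ['/']).map String.ofList).foldl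
              (fun acc token =>
                let item := PySem.Str.strip token
                if item = "" then acc else acc ++ [item]) normalized) []

-- ===== PORT B =====
-- Python B: joined = "/".join(part.replace("\\","/") for part in parts); one split, strip each token, drop empties.
def normalize_folder_parts_alt (parts : Option (List String)) : List String :=
  match parts with
  | none => []
  | some ps =>
      if ps.isEmpty then []
      else
        let joined := PySem.Str.join "/" (ps.map (fun part => PySem.Str.replace part "\\" "/"))
        (((PySem.Chars.splitOn joined.toList ['/']).map String.ofList).map PySem.Str.strip).filter
          (fun tok => tok ≠ "")

-- ===== PRECONDITION & SPEC =====
def Spec_normalize_folder_parts (parts : Option (List String)) (out : List String) : Prop := out = normalize_folder_parts_alt parts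
instance (parts : Option (List String)) (out : List String) : Decidable (Spec_normalize_folder_parts parts out) := by unfold Spec_normalize_folder_parts; infer_instance

-- ===== CLAIM (what is proved, stated in full; the proofs are below) =====
def Claim_equal_normalize_folder_parts : Prop := ∀ (parts : Option (List String)), Dom_normalize_folder_parts parts → Spec_normalize_folder_parts parts (normalize_folder_parts parts)

-- ===== LEMMAS AND PROOFS =====

-- Structural single-char split on '/', the shape both ports' splitOn reduces to.
def mySplit : List Char → List (List Char)
  | [] => [[]]
  | c :: rest => if c = '/' then [] :: mySplit rest else (mySplit rest).modifyHead (c :: ·)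

theorem mySplit_ne_nil (cs : List Char) : mySplit cs ≠ [] := by
  cases cs with
  | nil => simp [mySplit]
  | cons c rest =>
      simp only [mySplit]
      split
      · simp
      · cases h : mySplit rest with
        | nil => exact absurd h (mySplit_ne_nil rest)
        | cons a l => simp [List.modifyHead]

theorem splitOn_go_eq (fuel : Nat) : ∀ (l cur acc : _), l.length < fuel →
    PySem.Chars.splitOn.go ['/'] fuel l cur acc
      = acc.reverse ++ (mySplit l).modifyHead (cur.reverse ++ ·) := by
  induction fuel with
  | zero => intro l cur acc h; omega
  | succ fuel ih =>
      intro l cur acc h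
      cases l with
      | nil => simp [PySem.Chars.splitOn.go, mySplit, List.modifyHead]
      | cons c rest =>
          by_cases hc : c = '/'
          · subst hc
            have hpre : List.isPrefixOf ['/'] ('/' :: rest) = true := by
              simp [List.isPrefixOf]
            rw [PySem.Chars.splitOn.go]
            simp only [hpre, if_pos]
            rw [ih _ _ _ (by simpa using Nat.lt_of_succ_lt_succ h)]
            cases hs : mySplit rest with
            | nil => exact absurd hs (mySplit_ne_nil rest)
            | cons a l => simp [mySplit, List.modifyHead, hs]
          · have hpre : List.isPrefixOf ['/'] (c :: rest) = false := by
              simp [List.isPrefixOf]; exact fun hh => absurd hh.symm hc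
            rw [PySem.Chars.splitOn.go]
            simp only [hpre]
            rw [if_neg (by simp)]
            rw [ih _ _ _ (by simpa using Nat.lt_of_succ_lt_succ h)]
            cases hs : mySplit rest with
            | nil => exact absurd hs (mySplit_ne_nil rest)
            | cons a l => simp [mySplit, List.modifyHead, hs, hc]

theorem splitOn_eq (cs : List Char) : PySem.Chars.splitOn cs ['/'] = mySplit cs := by
  unfold PySem.Chars.splitOn
  rw [splitOn_go_eq (cs.length + 1) cs [] [] (by omega)]
  cases hs : mySplit cs with
  | nil => exact absurd hs (mySplit_ne_nil cs)
  | cons a l => simp [List.modifyHead]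

theorem mySplit_append_sep (a b : List Char) :
    mySplit (a ++ '/' :: b) = mySplit a ++ mySplit b := by
  induction a with
  | nil => simp [mySplit]
  | cons c a ih =>
      by_cases hc : c = '/'
      · subst hc; simp [mySplit, ih]
      · simp only [List.cons_append, mySplit, if_neg hc, ih]
        cases hs : mySplit a with
        | nil => exact absurd hs (mySplit_ne_nil a)
        | cons x l => simp [List.modifyHead]

theorem mySplit_snoc (cs : List Char) (c : Char) (hc : c ≠ '/') :
    mySplit (cs ++ [c]) = (mySplit cs).dropLast ++ [((mySplit cs).getLastD []) ++ [c]] := by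
  induction cs with
  | nil => simp [mySplit, hc, List.modifyHead]
  | cons d rest ih =>
      by_cases hd : d = '/'
      · subst hd
        simp only [List.cons_append, mySplit, if_pos, ih]
        cases hs : mySplit rest with
        | nil => exact absurd hs (mySplit_ne_nil rest)
        | cons x l => simp
      · simp only [List.cons_append, mySplit, if_neg hd, ih]
        cases hs : mySplit rest with
        | nil => exact absurd hs (mySplit_ne_nil rest)
        | cons x l =>
            cases l with
            | nil => simp [List.modifyHead]
            | cons y l' => simp [List.modifyHead]

-- strip facts
theorem isspace_ne_slash {c : Char} (h : PySem.Chars.isspace c = true) : c ≠ '/' := by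
  intro hc; subst hc
  have : PySem.Chars.isspace '/' = false := by decide
  simp [this] at h

theorem strip_cons_space (c : Char) (t : List Char) (h : PySem.Chars.isspace c = true) :
    PySem.Chars.strip (c :: t) = PySem.Chars.strip t := by
  simp [PySem.Chars.strip, PySem.Chars.lstrip, h]

theorem rstrip_snoc_space (c : Char) (t : List Char) (h : PySem.Chars.isspace c = true) :
    PySem.Chars.rstrip (t ++ [c]) = PySem.Chars.rstrip t := by
  simp [PySem.Chars.rstrip, h]

theorem strip_snoc_space (c : Char) (t : List Char) (h : PySem.Chars.isspace c = true) :
    PySem.Chars.strip (t ++ [c]) = PySem.Chars.strip t := by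
  induction t with
  | nil => simp [PySem.Chars.strip, PySem.Chars.lstrip, PySem.Chars.rstrip, h]
  | cons a t ih =>
      by_cases ha : PySem.Chars.isspace a = true
      · rw [List.cons_append, strip_cons_space a _ ha, strip_cons_space a _ ha, ih]
      · simp only [PySem.Chars.strip, PySem.Chars.lstrip, List.cons_append, List.dropWhile_cons, ha]
        simp only [Bool.false_eq_true, if_false]
        exact rstrip_snoc_space c (a :: t) h

-- the per-character normalized token list both ports compute
def toks (cs : List Char) : List (List Char) :=
  ((mySplit cs).map PySem.Chars.strip).filter (fun t => t ≠ [])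

theorem toks_nil : toks [] = [] := by decide

theorem toks_cons (c : Char) (cs : List Char)
    (h : c = '/' ∨ PySem.Chars.isspace c = true) : toks (c :: cs) = toks cs := by
  rcases h with h | h
  · subst h; simp [toks, mySplit, PySem.Chars.strip, PySem.Chars.lstrip, PySem.Chars.rstrip]
  · simp only [toks, mySplit, if_neg (isspace_ne_slash h)]
    cases hs : mySplit cs with
    | nil => exact absurd hs (mySplit_ne_nil cs)
    | cons x l => simp [List.modifyHead, strip_cons_space c x h]

theorem toks_snoc (cs : List Char) (c : Char)
    (h : c = '/' ∨ PySem.Chars.isspace c = true) : toks (cs ++ [c]) = toks cs := by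
  rcases h with h | h
  · subst h
    have := mySplit_append_sep cs []
    simp only [toks, this]
    simp [mySplit, PySem.Chars.strip, PySem.Chars.lstrip, PySem.Chars.rstrip]
  · rw [toks, mySplit_snoc cs c (isspace_ne_slash h)]
    cases hs : mySplit cs with
    | nil => exact absurd hs (mySplit_ne_nil cs)
    | cons x l =>
        rw [toks, hs]
        have hdl : (x :: l).dropLast ++ [(x :: l).getLastD []] = x :: l := by
          have h1 : (x :: l).getLastD [] = (x :: l).getLast (by simp) := by
            rw [List.getLastD_eq_getLast?, List.getLast?_eq_some_getLast (by simp)]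
            rfl
          rw [h1]
          exact List.dropLast_concat_getLast _
        calc ((((x :: l).dropLast ++ [(x :: l).getLastD [] ++ [c]]).map PySem.Chars.strip).filter (fun t => t ≠ []))
            = ((((x :: l).dropLast ++ [(x :: l).getLastD []]).map PySem.Chars.strip).filter (fun t => t ≠ [])) := by
              simp [strip_snoc_space c _ h]
          _ = (((x :: l).map PySem.Chars.strip).filter (fun t => t ≠ [])) := by rw [hdl]

theorem toks_append_sep (a b : List Char) : toks (a ++ '/' :: b) = toks a ++ toks b := by
  simp [toks, mySplit_append_sep]

theorem toks_dropWhile (p : Char → Bool)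
    (hp : ∀ c, p c = true → c = '/' ∨ PySem.Chars.isspace c = true) (cs : List Char) :
    toks (List.dropWhile p cs) = toks cs := by
  induction cs with
  | nil => rfl
  | cons a cs ih =>
      by_cases ha : p a = true
      · rw [List.dropWhile_cons, if_pos ha, ih, toks_cons a cs (hp a ha)]
      · rw [List.dropWhile_cons, if_neg ha]

theorem toks_rdrop (p : Char → Bool)
    (hp : ∀ c, p c = true → c = '/' ∨ PySem.Chars.isspace c = true) (cs : List Char) :
    toks (List.dropWhile p cs.reverse).reverse = toks cs := by
  induction cs using List.reverseRecOn with
  | nil => rfl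
  | append_singleton xs c ih =>
      by_cases hc : p c = true
      · rw [List.reverse_append, List.reverse_singleton, List.singleton_append,
          List.dropWhile_cons, if_pos hc, ih, toks_snoc xs c (hp c hc)]
      · rw [List.reverse_append, List.reverse_singleton, List.singleton_append,
          List.dropWhile_cons, if_neg hc]
        simp

theorem toks_strip (cs : List Char) : toks (PySem.Chars.strip cs) = toks cs := by
  have h1 : toks (PySem.Chars.lstrip cs) = toks cs :=
    toks_dropWhile PySem.Chars.isspace (fun c hc => Or.inr hc) cs
  rw [PySem.Chars.strip, PySem.Chars.rstrip,
    toks_rdrop PySem.Chars.isspace (fun c hc => Or.inr hc) _, h1]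

theorem toks_stripChars_slash (cs : List Char) :
    toks (PySem.Chars.stripChars cs ['/']) = toks cs := by
  have hp : ∀ c, (['/'].contains c) = true → c = '/' ∨ PySem.Chars.isspace c = true := by
    intro c hc; left; simpa using hc
  rw [PySem.Chars.stripChars]
  rw [toks_rdrop _ hp, toks_dropWhile _ hp]

-- string-level conversion of a token list
theorem conv_tokens (M : List (List Char)) :
    (((M.map String.ofList).map PySem.Str.strip).filter (fun t => t ≠ ""))
      = ((M.map PySem.Chars.strip).filter (fun t => t ≠ [])).map String.ofList := by
  induction M with
  | nil => rfl
  | cons x M ih =>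
      have hstrip : PySem.Str.strip (String.ofList x) = String.ofList (PySem.Chars.strip x) := by
        simp [PySem.Str.strip]
      by_cases hx : PySem.Chars.strip x = []
      · simp [hstrip, hx]
        simpa using ih
      · have hne : String.ofList (PySem.Chars.strip x) ≠ "" := by
          intro hh
          have := congrArg String.toList hh
          simp at this
          exact hx this
        simp [hstrip, hx, hne]
        simpa using ih

-- per-part contribution of A
def rpl (part : String) : List Char := PySem.Chars.replace part.toList ['\\'] ['/']

theorem a_part_eq (normalized : List String) (part : String) :
    (let text := PySem.Str.stripChars (PySem.Str.strip (PySem.Str.replace part "\\" "/")) "/"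
     if text = "" then normalized
     else
       ((PySem.Chars.splitOn text.toList ['/']).map String.ofList).foldl
         (fun acc token =>
           let item := PySem.Str.strip token
           if item = "" then acc else acc ++ [item]) normalized)
      = normalized ++ (toks (rpl part)).map String.ofList := by
  have htext : (PySem.Str.stripChars (PySem.Str.strip (PySem.Str.replace part "\\" "/")) "/").toList
      = PySem.Chars.stripChars (PySem.Chars.strip (rpl part)) ['/'] := by
    simp [PySem.Str.stripChars, PySem.Str.strip, PySem.Str.replace, rpl]
  have hinv : toks (PySem.Chars.stripChars (PySem.Chars.strip (rpl part)) ['/']) = toks (rpl part) := by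
    rw [toks_stripChars_slash, toks_strip]
  by_cases hempty : PySem.Str.stripChars (PySem.Str.strip (PySem.Str.replace part "\\" "/")) "/" = ""
  · simp only [hempty, if_pos]
    have : toks (rpl part) = [] := by
      rw [← hinv]
      have : (PySem.Chars.stripChars (PySem.Chars.strip (rpl part)) ['/']) = [] := by
        rw [← htext, hempty]; rfl
      rw [this, toks_nil]
    simp [this]
  · simp only [if_neg hempty]
    have hfold : ∀ (L : List String) (acc : List String),
        L.foldl (fun acc token =>
          let item := PySem.Str.strip token
          if item = "" then acc else acc ++ [item]) acc
          = acc ++ ((L.map PySem.Str.strip).filter (fun t => t ≠ "")) := by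
      intro L
      induction L with
      | nil => intro acc; simp
      | cons x L ih =>
          intro acc
          simp only [List.foldl_cons, List.map_cons, List.filter_cons]
          by_cases hx : PySem.Str.strip x = ""
          · simp only [hx, if_pos, ih]
            simp
          · simp only [hx, ih]
            simp [hx]
    rw [hfold, conv_tokens, splitOn_eq, htext]
    show normalized ++ (toks (PySem.Chars.stripChars (PySem.Chars.strip (rpl part)) ['/'])).map String.ofList
        = normalized ++ (toks (rpl part)).map String.ofList
    rw [hinv]

theorem toks_join (ls : List (List Char)) (h : ls ≠ []) :
    toks (PySem.Chars.join ['/'] ls) = ls.flatMap toks := by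
  cases ls with
  | nil => exact absurd rfl h
  | cons x ls =>
      induction ls generalizing x with
      | nil => simp [PySem.Chars.join_singleton]
      | cons y ls ih =>
          rw [PySem.Chars.join_cons_cons]
          have : x ++ ['/'] ++ PySem.Chars.join ['/'] (y :: ls)
              = x ++ '/' :: PySem.Chars.join ['/'] (y :: ls) := by simp
          rw [this, toks_append_sep, ih y (by simp)]
          simp

-- ===== VERDICT (by name: the statement is the Claim_ definition above) =====
theorem normalize_folder_parts_spec : Claim_equal_normalize_folder_parts := by
  intro parts _
  show normalize_folder_parts parts = normalize_folder_parts_alt parts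
  cases parts with
  | none => rfl
  | some ps =>
      cases ps with
      | nil => rfl
      | cons p ps =>
          simp only [normalize_folder_parts, normalize_folder_parts_alt, List.isEmpty_cons,
            if_neg Bool.false_ne_true]
          have houter : ∀ (qs : List String) (acc : List String),
              qs.foldl (fun normalized part =>
                let text := PySem.Str.stripChars (PySem.Str.strip (PySem.Str.replace part "\\" "/")) "/"
                if text = "" then normalized
                else
                  ((PySem.Chars.splitOn text.toList ['/']).map String.ofList).foldl
                    (fun acc token =>
                      let item := PySem.Str.strip token
                      if item = "" then acc else acc ++ [item]) normalized) acc
              = acc ++ qs.flatMap (fun part => (toks (rpl part)).map String.ofList) := by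
            intro qs
            induction qs with
            | nil => intro acc; simp
            | cons q qs ih =>
                intro acc
                rw [List.foldl_cons, a_part_eq acc q, ih, List.flatMap_cons, List.append_assoc]
          rw [houter]
          have hjoined : (PySem.Str.join "/" ((p :: ps).map (fun part => PySem.Str.replace part "\\" "/"))).toList
              = PySem.Chars.join ['/'] ((p :: ps).map rpl) := by
            simp [PySem.Str.join, PySem.Str.replace, rpl, List.map_map, Function.comp_def]
            rfl
          rw [splitOn_eq, hjoined]
          rw [conv_tokens]
          show (p :: ps).flatMap (fun part => (toks (rpl part)).map String.ofList)
              = (toks (PySem.Chars.join ['/'] ((p :: ps).map rpl))).map String.ofList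
          rw [toks_join _ (by simp), List.flatMap_map, List.map_flatMap]
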